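-- pv_equiv track=rewrite | github.com/jokergodd/Splitter | evals/metrics_retrieval.py | _first_hit_rank
-- ===== SOURCE A (Python) =====
-- from collections.abc import Iterable, Sequence
--
-- def _normalize_ids(ids: Sequence[str]) -> list[str]:
--     return [str(item) for item in ids]
--
-- def _first_hit_rank(retrieved_ids: Sequence[str], reference_ids: Sequence[str]) -> int | None:
--     reference_set = set(_normalize_ids(reference_ids))
--     if not reference_set:
--         return None
--
--     for rank, item in enumerate(_normalize_ids(retrieved_ids), start=1):
--         if item in reference_set:
--             return rank
--     return None
-- ===== SOURCE B (Python) =====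
-- def _first_hit_rank(retrieved_ids, reference_ids):
--     retrieved = [str(item) for item in retrieved_ids]
--     first = {}
--     for i, item in enumerate(retrieved):
--         if item not in first:
--             first[item] = i
--     best = None
--     for ref in [str(item) for item in reference_ids]:
--         pos = first.get(ref)
--         if pos is None:
--             continue
--         if best is None or pos < best:
--             best = pos
--     return None if best is None else best + 1
-- ===== Notes on version B (the rewrite author's own statement) =====
-- stated objective: alternative
-- what changed: Inverts the traversal: instead of scanning retrieved ids and short-circuiting on the first one in the reference set, B builds a dict from each retrieved id to its first position, then scans the reference ids and returns the minimum looked-up position plus one (None if no reference is present).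
import Mathlib
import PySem

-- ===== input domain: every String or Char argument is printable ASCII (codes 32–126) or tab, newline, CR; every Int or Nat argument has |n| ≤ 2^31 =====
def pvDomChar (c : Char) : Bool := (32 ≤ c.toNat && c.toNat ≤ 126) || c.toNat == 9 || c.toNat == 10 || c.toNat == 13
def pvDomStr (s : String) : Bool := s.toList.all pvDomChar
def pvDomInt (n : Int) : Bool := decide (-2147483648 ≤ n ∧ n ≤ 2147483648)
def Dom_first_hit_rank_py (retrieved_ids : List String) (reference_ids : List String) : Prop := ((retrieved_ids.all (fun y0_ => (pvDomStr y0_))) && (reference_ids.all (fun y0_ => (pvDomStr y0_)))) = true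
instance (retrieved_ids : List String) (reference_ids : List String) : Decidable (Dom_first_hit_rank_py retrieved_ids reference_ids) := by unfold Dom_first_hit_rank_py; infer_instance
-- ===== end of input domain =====

-- B inverts the traversal: it scans the reference ids and takes the minimum first
-- position of any of them in retrieved (alternative decomposition, not faster).

-- ===== PORT A =====
-- _normalize_ids: [str(item) for item in ids]; str on a str is the string itself
def pvNormalizeIds (ids : List String) : List String := ids.map (fun item => item)

-- for rank, item in enumerate(..., start=1): if item in reference_set: return rank
def pvFirstHitLoop (referenceSet : PySem.Set String) (rank : Int) : List String → Option Int
  | [] => none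
  | item :: rest =>
    if referenceSet.contains item then some rank
    else pvFirstHitLoop referenceSet (rank + 1) rest

def first_hit_rank_py (retrieved_ids : List String) (reference_ids : List String) : Option Int :=
  let referenceSet := PySem.Set.ofList (pvNormalizeIds reference_ids)
  if referenceSet.isEmpty then none
  else pvFirstHitLoop referenceSet 1 (pvNormalizeIds retrieved_ids)

-- ===== PORT B =====
-- first = {}; for i, item in enumerate(retrieved): if item not in first: first[item] = i
def pvBuildFirst (first : PySem.Dict String Nat) (i : Nat) : List String → PySem.Dict String Nat
  | [] => first
  | item :: rest =>
    if first.contains item then pvBuildFirst first (i + 1) rest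
    else pvBuildFirst (first.insert item i) (i + 1) rest

-- for ref in normalized refs: pos = first.get(ref); continue if None;
-- keep the smallest pos seen in best
def pvBestLoop (first : PySem.Dict String Nat) (best : Option Nat) : List String → Option Nat
  | [] => best
  | ref :: rest =>
    match first.get? ref with
    | none => pvBestLoop first best rest
    | some pos =>
      let best' := match best with
        | none => some pos
        | some b => if pos < b then some pos else best
      pvBestLoop first best' rest

def first_hit_rank_py_alt (retrieved_ids : List String) (reference_ids : List String) : Option Int :=
  let retrieved := retrieved_ids.map (fun item => item)
  let first := pvBuildFirst PySem.Dict.empty 0 retrieved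
  match pvBestLoop first none (reference_ids.map (fun item => item)) with
  | none => none
  | some b => some ((b : Int) + 1)

-- ===== PRECONDITION & SPEC =====
def Spec_first_hit_rank_py (retrieved_ids : List String) (reference_ids : List String) (out : Option Int) : Prop := out = first_hit_rank_py_alt retrieved_ids reference_ids
instance (retrieved_ids : List String) (reference_ids : List String) (out : Option Int) : Decidable (Spec_first_hit_rank_py retrieved_ids reference_ids out) := by unfold Spec_first_hit_rank_py; infer_instance

-- ===== CLAIM (what is proved, stated in full; the proofs are below) =====
def Claim_equal_first_hit_rank_py : Prop := ∀ (retrieved_ids : List String) (reference_ids : List String), Dom_first_hit_rank_py retrieved_ids reference_ids → Spec_first_hit_rank_py retrieved_ids reference_ids (first_hit_rank_py retrieved_ids reference_ids)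

-- ===== LEMMAS AND PROOFS =====

-- proof-side reference loop: B's min-of-positions loop, with the dict lookup
-- replaced by list.index on the retrieved list
def pvBestLoopIx (retrieved : List String) (best : Option Nat) : List String → Option Nat
  | [] => best
  | ref :: rest =>
    match PySem.List.index? retrieved ref with
    | none => pvBestLoopIx retrieved best rest
    | some pos =>
      let best' := match best with
        | none => some pos
        | some b => if pos < b then some pos else best
      pvBestLoopIx retrieved best' rest

theorem pvBuildFirst_get? (xs : List String) (first : PySem.Dict String Nat) (i : Nat) (r : String) :
    (pvBuildFirst first i xs).get? r
      = if first.contains r then first.get? r else (PySem.List.index? xs r).map (· + i) := by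
  induction xs generalizing first i with
  | nil =>
    by_cases hc : first.contains r
    · simp [pvBuildFirst, hc]
    · simp only [pvBuildFirst, if_neg hc]
      simp [PySem.Dict.get?_eq_none_iff_contains, hc, PySem.List.index?_eq_idxOf?]
  | cons item xs ih =>
    by_cases hc : first.contains item
    · simp only [pvBuildFirst, if_pos hc]
      rw [ih]
      by_cases hr : r = item
      · subst hr
        simp [hc]
      · have hidx : PySem.List.index? (item :: xs) r = (PySem.List.index? xs r).map (· + 1) :=
          PySem.List.index?_cons_of_ne xs (fun h => hr h.symm)
      
        by_cases hcr : first.contains r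
        · simp [hcr]
        · rw [if_neg hcr, if_neg hcr, hidx]
          cases PySem.List.index? xs r with
          | none => rfl
          | some b => simp; omega
    · simp only [pvBuildFirst, if_neg hc]
      rw [ih]
      by_cases hr : r = item
      · subst hr
        have h1 : (first.insert r i).contains r = true := PySem.Dict.contains_insert_self ..
        have h2 : (first.insert r i).get? r = some i := PySem.Dict.get?_insert_self ..
        have h3 : PySem.List.index? (r :: xs) r = some 0 := PySem.List.index?_cons_self r xs
        rw [if_pos h1, h2, if_neg hc, h3]
        simp
      · have h1 : (first.insert item i).contains r = first.contains r := by
          rw [PySem.Dict.contains_insert]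
          simp [hr]
        have h2 : (first.insert item i).get? r = first.get? r :=
          PySem.Dict.get?_insert_of_ne _ _ hr
        have hidx : PySem.List.index? (item :: xs) r = (PySem.List.index? xs r).map (· + 1) :=
          PySem.List.index?_cons_of_ne xs (fun h => hr h.symm)
        rw [h1, h2, hidx]
        by_cases hcr : first.contains r
        · simp [hcr]
        · rw [if_neg hcr, if_neg hcr]
          cases PySem.List.index? xs r with
          | none => rfl
          | some b => simp; omega

theorem pvBestLoop_eq_ix (first : PySem.Dict String Nat) (retrieved : List String)
    (h : ∀ s, first.get? s = PySem.List.index? retrieved s) (best : Option Nat)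
    (refs : List String) :
    pvBestLoop first best refs = pvBestLoopIx retrieved best refs := by
  induction refs generalizing best with
  | nil => rfl
  | cons r rest ih =>
    simp only [pvBestLoop, pvBestLoopIx, h r]
    cases PySem.List.index? retrieved r with
    | none => exact ih best
    | some p => exact ih _

theorem pvBestLoopIx_nil (best : Option Nat) (refs : List String) :
    pvBestLoopIx [] best refs = best := by
  induction refs with
  | nil => rfl
  | cons r rest ih =>
    have h : PySem.List.index? ([] : List String) r = none := rfl
    simp only [pvBestLoopIx, h]
    exact ih

theorem pvBestLoopIx_keep_zero (xs : List String) (refs : List String) :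
    pvBestLoopIx xs (some 0) refs = some 0 := by
  induction refs with
  | nil => rfl
  | cons r rest ih =>
    simp only [pvBestLoopIx, PySem.List.index?_eq_idxOf?]
    cases List.idxOf? r xs with
    | none => exact ih
    | some p => simpa using ih

theorem pvBestLoopIx_shift (x : String) (xs : List String) (refs : List String)
    (hx : x ∉ refs) (best : Option Nat) :
    pvBestLoopIx (x :: xs) (best.map (· + 1)) refs
      = (pvBestLoopIx xs best refs).map (· + 1) := by
  induction refs generalizing best with
  | nil => rfl
  | cons r rest ih =>
    have hrx : x ≠ r := fun h => hx (h ▸ List.mem_cons_self ..)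
    have hx' : x ∉ rest := fun h => hx (List.mem_cons_of_mem _ h)
    have hidx : PySem.List.index? (x :: xs) r = (PySem.List.index? xs r).map (· + 1) :=
      PySem.List.index?_cons_of_ne xs hrx
    cases h : PySem.List.index? xs r with
    | none =>
      have h2 : PySem.List.index? (x :: xs) r = none := by rw [hidx, h]; rfl
      simp only [pvBestLoopIx, h, h2]
      exact ih hx' best
    | some p =>
      have h2 : PySem.List.index? (x :: xs) r = some (p + 1) := by rw [hidx, h]; rfl
      cases best with
      | none =>
        simp only [pvBestLoopIx, h, h2, Option.map_none]
        exact ih hx' (some p)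
      | some b =>
        by_cases hpb : p < b
        · have h3 : p + 1 < b + 1 := by omega
          simp only [pvBestLoopIx, h, h2, Option.map_some, if_pos hpb, if_pos h3]
          exact ih hx' (some p)
        · have h3 : ¬ (p + 1 < b + 1) := by omega
          simp only [pvBestLoopIx, h, h2, Option.map_some, if_neg hpb, if_neg h3]
          exact ih hx' (some b)

theorem pvBestLoopIx_mem_zero (x : String) (xs : List String) (refs : List String)
    (hx : x ∈ refs) (best : Option Nat) :
    pvBestLoopIx (x :: xs) best refs = some 0 := by
  induction refs generalizing best with
  | nil => cases hx
  | cons r rest ih =>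
    by_cases hrx : r = x
    · subst hrx
      have hidx : PySem.List.index? (r :: xs) r = some 0 := PySem.List.index?_cons_self r xs
      have hb : (match best with
          | none => some 0
          | some b => if 0 < b then some 0 else best) = some (0 : Nat) := by
        cases best with
        | none => rfl
        | some b =>
          by_cases hb0 : 0 < b
          · simp [hb0]
          · have : b = 0 := by omega
            simp [this]
      simp only [pvBestLoopIx, hidx]
      rw [hb]
      exact pvBestLoopIx_keep_zero _ _
    · have hx' : x ∈ rest := by
        rcases List.mem_cons.mp hx with h | h
        · exact absurd h.symm hrx
        · exact h
      simp only [pvBestLoopIx, PySem.List.index?_eq_idxOf?]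
      cases List.idxOf? r (x :: xs) with
      | none => exact ih hx' best
      | some p => exact ih hx' _

theorem pvFirstHit_eq_best (refs : List String) (xs : List String) (k : Int) :
    pvFirstHitLoop (PySem.Set.ofList refs) k xs
      = (pvBestLoopIx xs none refs).map (fun b => k + (b : Int)) := by
  induction xs generalizing k with
  | nil => simp [pvFirstHitLoop, pvBestLoopIx_nil]
  | cons x xs ih =>
    by_cases hx : x ∈ refs
    · have hc : (PySem.Set.ofList refs).contains x = true :=
        (PySem.Set.contains_iff ..).mpr ((PySem.Set.mem_ofList ..).mpr hx)
      unfold pvFirstHitLoop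
      rw [if_pos hc, pvBestLoopIx_mem_zero x xs refs hx none]
      simp
    · have hc : ¬ ((PySem.Set.ofList refs).contains x = true) := by
        intro h
        exact hx ((PySem.Set.mem_ofList ..).mp ((PySem.Set.contains_iff ..).mp h))
      have hshift := pvBestLoopIx_shift x xs refs hx none
      simp only [Option.map_none] at hshift
      simp only [pvFirstHitLoop, hc, ih (k + 1), hshift]
      cases pvBestLoopIx xs none refs with
      | none => rfl
      | some b =>
        simp only [Option.map_some]
        simp
        ring

-- ===== VERDICT (by name: the statement is the Claim_ definition above) =====
theorem first_hit_rank_py_spec : Claim_equal_first_hit_rank_py := by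
  intro retrieved_ids reference_ids _
  unfold Spec_first_hit_rank_py first_hit_rank_py first_hit_rank_py_alt pvNormalizeIds
  simp only [List.map_id']
  rw [pvBestLoop_eq_ix (pvBuildFirst PySem.Dict.empty 0 retrieved_ids) retrieved_ids
    (fun s => by
      rw [pvBuildFirst_get? retrieved_ids PySem.Dict.empty 0 s]
      simp [PySem.Dict.contains_empty, PySem.List.index?_eq_idxOf?])]
  by_cases hempty : (PySem.Set.ofList reference_ids).isEmpty
  · have : reference_ids = [] := by
      cases reference_ids with
      | nil => rfl
      | cons r rest =>
        exfalso
        have hm : r ∈ PySem.Set.ofList (r :: rest) :=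
          (PySem.Set.mem_ofList ..).mpr (List.mem_cons_self ..)
        rw [List.isEmpty_iff.mp hempty] at hm
        cases hm
    subst this
    simp [pvBestLoopIx]
  · rw [if_neg hempty, pvFirstHit_eq_best]
    cases pvBestLoopIx retrieved_ids none reference_ids with
    | none => rfl
    | some b => simp [add_comm]
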